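-- pv_equiv track=rewrite | github.com/pbcong/SC4023 | source/main.py | parse_matric
-- ===== SOURCE A (Python) =====
-- TOWN_MAP = {
--     0: "BEDOK",      1: "BUKIT PANJANG",  2: "CLEMENTI",
--     3: "CHOA CHU KANG", 4: "HOUGANG",     5: "JURONG WEST",
--     6: "PASIR RIS",  7: "TAMPINES",       8: "WOODLANDS",
--     9: "YISHUN",
-- }
--
-- def parse_matric(matric_num):
--     """Parse matriculation number -> (target_year, start_month, towns)."""
--     digits = [int(c) for c in matric_num if c.isdigit()]
--     if len(digits) < 2:
--         raise ValueError(f"'{matric_num}' has fewer than 2 digits")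
--
--     last_digit = digits[-1]
--     target_year = 2020 + last_digit if last_digit < 5 else 2010 + last_digit
--
--     second_last = digits[-2]
--     start_month = second_last if second_last != 0 else 10
--
--     unique_digits = sorted(set(digits))
--     towns = [TOWN_MAP[d] for d in unique_digits]
--     return target_year, start_month, towns
-- ===== SOURCE B (Python) =====
-- TOWN_MAP = {
--     0: "BEDOK",      1: "BUKIT PANJANG",  2: "CLEMENTI",
--     3: "CHOA CHU KANG", 4: "HOUGANG",     5: "JURONG WEST",
--     6: "PASIR RIS",  7: "TAMPINES",       8: "WOODLANDS",
--     9: "YISHUN",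
-- }
--
-- def parse_matric(matric_num):
--     """Parse matriculation number -> (target_year, start_month, towns)."""
--     # One pass over the string: keep a 10-slot seen table and the last two digits.
--     seen = [False] * 10
--     second_last = None
--     last = None
--     for c in matric_num:
--         if c.isdigit():
--             d = ord(c) - 48
--             seen[d] = True
--             second_last = last
--             last = d
--     if second_last is None:
--         raise ValueError(f"'{matric_num}' has fewer than 2 digits")
--     target_year = 2020 + last if last < 5 else 2010 + last
--     start_month = second_last if second_last != 0 else 10
--     towns = [TOWN_MAP[d] for d in range(10) if seen[d]]
--     return target_year, start_month, towns
-- ===== Notes on version B (the rewrite author's own statement) =====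
-- stated objective: alternative
-- what changed: B replaces A's build-list-then-sorted(set(...)) pipeline with a single pass over the string that maintains a 10-slot boolean seen table and the last two digits, then emits towns by scanning the fixed digit range 0..9 instead of sorting a deduplicated set.
import Mathlib
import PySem

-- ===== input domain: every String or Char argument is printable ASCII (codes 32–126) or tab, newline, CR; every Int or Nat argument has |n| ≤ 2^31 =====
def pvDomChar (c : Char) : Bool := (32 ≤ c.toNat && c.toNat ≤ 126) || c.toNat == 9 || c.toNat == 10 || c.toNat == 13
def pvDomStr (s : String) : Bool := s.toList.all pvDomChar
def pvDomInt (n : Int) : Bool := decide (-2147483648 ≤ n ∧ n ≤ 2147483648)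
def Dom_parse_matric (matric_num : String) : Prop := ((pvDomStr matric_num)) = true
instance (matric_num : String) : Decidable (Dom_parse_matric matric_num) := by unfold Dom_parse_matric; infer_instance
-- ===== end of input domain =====

-- B does one pass over the string (10-slot seen table + last two digits) and scans 0..9,
-- instead of A's list-of-digits + sorted(set(...)); same results, different algorithm.


-- ===== PORT A =====
-- TOWN_MAP[d] (keys 0..9; both programs only look up digits 0..9, so the lookup never raises)
def townMap (d : Int) : String :=
  if d = 0 then "BEDOK" else if d = 1 then "BUKIT PANJANG" else if d = 2 then "CLEMENTI"
  else if d = 3 then "CHOA CHU KANG" else if d = 4 then "HOUGANG" else if d = 5 then "JURONG WEST"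
  else if d = 6 then "PASIR RIS" else if d = 7 then "TAMPINES" else if d = 8 then "WOODLANDS"
  else if d = 9 then "YISHUN" else ""

-- int(c) for a char with c.isdigit() (ASCII domain): exact as c.toNat - 48
def parse_matric (matric_num : String) : Int × Int × List String :=
  let digits : List Int :=
    (matric_num.toList.filter PySem.Chars.isdigit).map (fun c => (c.toNat : Int) - 48)
  if digits.length < 2 then (0, 0, [])  -- Python: raise ValueError — excluded by Pre_
  else
    let last_digit := PySem.List.pyGetD digits (-1) 0
    let target_year := if last_digit < 5 then 2020 + last_digit else 2010 + last_digit
    let second_last := PySem.List.pyGetD digits (-2) 0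
    let start_month := if second_last ≠ 0 then second_last else 10
    let unique_digits := PySem.List.sorted (PySem.Set.ofList digits) (fun x => x)
    let towns := unique_digits.map townMap
    (target_year, start_month, towns)

-- ===== PORT B =====
def parse_matric_alt (matric_num : String) : Int × Int × List String :=
  let st := matric_num.toList.foldl
    (fun (st : List Bool × Option Int × Option Int) c =>
      if PySem.Chars.isdigit c then
        let d : Int := (c.toNat : Int) - 48   -- ord(c) - 48; 0 ≤ d ≤ 9 here
        (st.1.set d.toNat true, st.2.2, some d)
      else st)
    (List.replicate 10 false, none, none)
  match st.2.1, st.2.2 with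
  | some second_last, some last =>
    let target_year := if last < 5 then 2020 + last else 2010 + last
    let start_month := if second_last ≠ 0 then second_last else 10
    let towns := ((PySem.List.pyRange 0 10).filter
        (fun d => PySem.List.pyGetD st.1 d false)).map townMap
    (target_year, start_month, towns)
  | _, _ => (0, 0, [])  -- Python: raise ValueError — excluded by Pre_

-- ===== PRECONDITION & SPEC =====
-- Pre_ excludes exactly the strings with fewer than 2 digit characters, on which A raises ValueError.
def Pre_parse_matric (matric_num : String) : Prop :=
  2 ≤ (matric_num.toList.filter PySem.Chars.isdigit).length
instance (matric_num : String) : Decidable (Pre_parse_matric matric_num) := by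
  unfold Pre_parse_matric; infer_instance
def pvWitness_parse_matric : String := "U2211149A"

def Spec_parse_matric (matric_num : String) (out : Int × Int × List String) : Prop := out = parse_matric_alt matric_num
instance (matric_num : String) (out : Int × Int × List String) : Decidable (Spec_parse_matric matric_num out) := by unfold Spec_parse_matric; infer_instance

-- ===== CLAIM (what is proved, stated in full; the proofs are below) =====
def Claim_equal_parse_matric : Prop := ∀ (matric_num : String), Dom_parse_matric matric_num → Pre_parse_matric matric_num → Spec_parse_matric matric_num (parse_matric matric_num)

-- ===== LEMMAS AND PROOFS =====

-- the digit list both programs (implicitly or explicitly) traverse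
def pvDigits (l : List Char) : List Int :=
  (l.filter PySem.Chars.isdigit).map (fun c => (c.toNat : Int) - 48)

-- B's per-digit step and seen-table step
def pvDigStep (st : List Bool × Option Int × Option Int) (d : Int) :
    List Bool × Option Int × Option Int :=
  (st.1.set d.toNat true, st.2.2, some d)

def pvLastTwo : List Int → Option Int → Option Int → Option Int × Option Int
  | [], s, la => (s, la)
  | d :: ds, _, la => pvLastTwo ds la (some d)

lemma pvDigits_bounds (l : List Char) : ∀ d ∈ pvDigits l, 0 ≤ d ∧ d < 10 := by
  intro d hd
  simp only [pvDigits, List.mem_map, List.mem_filter] at hd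
  obtain ⟨c, ⟨_, hc⟩, rfl⟩ := hd
  simp only [PySem.Chars.isdigit, Bool.and_eq_true, decide_eq_true_eq, Char.le_def] at hc
  have h0 : ('0' : Char).val = 48 := rfl
  have h9 : ('9' : Char).val = 57 := rfl
  rw [h0, h9] at hc
  have : 48 ≤ c.toNat ∧ c.toNat ≤ 57 := by
    constructor <;> [exact_mod_cast hc.1; exact_mod_cast hc.2]
  omega

lemma fold_eq_digits (l : List Char) (st : List Bool × Option Int × Option Int) :
    l.foldl
      (fun (st : List Bool × Option Int × Option Int) c =>
        if PySem.Chars.isdigit c then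
          (st.1.set ((c.toNat : Int) - 48).toNat true, st.2.2, some ((c.toNat : Int) - 48))
        else st) st
    = (pvDigits l).foldl pvDigStep st := by
  induction l generalizing st with
  | nil => rfl
  | cons c l ih =>
    by_cases h : PySem.Chars.isdigit c = true
    · simp only [List.foldl_cons, if_pos h, pvDigits, List.filter_cons_of_pos h, List.map_cons]
      simpa [pvDigits, pvDigStep] using ih _
    · simp only [List.foldl_cons, if_neg h, pvDigits, List.filter_cons_of_neg h]
      simpa [pvDigits] using ih st

lemma foldl_digStep (ds : List Int) (sn : List Bool) (s la : Option Int) :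
    ds.foldl pvDigStep (sn, s, la)
      = (ds.foldl (fun sn d => sn.set d.toNat true) sn, pvLastTwo ds s la) := by
  induction ds generalizing sn s la with
  | nil => rfl
  | cons d ds ih => simp [pvDigStep, pvLastTwo, ih]

lemma pvLastTwo_concat2 (ds : List Int) (a b : Int) (s la : Option Int) :
    pvLastTwo (ds ++ [a, b]) s la = (some a, some b) := by
  induction ds generalizing s la with
  | nil => rfl
  | cons d ds ih => simp [pvLastTwo, ih]

lemma seen_foldl (ds : List Int) (sn : List Bool)
    (hb : ∀ d ∈ ds, 0 ≤ d ∧ d < 10) (hl : sn.length = 10) (i : Nat) (hi : i < 10) :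
    (ds.foldl (fun sn d => sn.set d.toNat true) sn).getD i false
      = (sn.getD i false || decide ((i : Int) ∈ ds)) := by
  induction ds generalizing sn with
  | nil => simp
  | cons d ds ih =>
    have hd := hb d (by simp)
    have hrec := ih (sn.set d.toNat true) (fun x hx => hb x (by simp [hx]))
      (by simp [hl])
    simp only [List.foldl_cons, hrec]
    have hset : (sn.set d.toNat true).getD i false
        = if d.toNat = i then true else sn.getD i false := by
      simp only [List.getD_eq_getElem?_getD, List.getElem?_set]
      split_ifs with h1 h2
      · simp
      · exfalso; rw [hl] at h2; omega
      · rfl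
    rw [hset]
    by_cases h : d = (i : Int)
    · have hti : d.toNat = i := by omega
      simp [h, List.mem_cons]
    · have hti : d.toNat ≠ i := by omega
      have h' : ¬((i : Int) = d) := fun he => h he.symm
      simp [hti, h', List.mem_cons]

lemma mem_range10 (x : Int) : x ∈ ([0,1,2,3,4,5,6,7,8,9] : List Int) ↔ 0 ≤ x ∧ x < 10 := by
  simp; omega

lemma sorted_set_eq (ds : List Int) (hb : ∀ d ∈ ds, 0 ≤ d ∧ d < 10) :
    PySem.List.sorted (PySem.Set.ofList ds) (fun x => x)
      = ([0,1,2,3,4,5,6,7,8,9] : List Int).filter (fun d => decide (d ∈ ds)) := by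
  apply PySem.List.sorted_eq_of_perm_of_pairwise_lt
  · rw [List.perm_ext_iff_of_nodup]
    · intro a
      simp only [List.mem_filter, PySem.Set.mem_ofList, decide_eq_true_eq, mem_range10]
      constructor
      · intro ⟨_, h⟩; exact h
      · intro h; exact ⟨hb a h, h⟩
    · exact List.Nodup.filter _ (by decide)
    · exact PySem.Set.nodup_ofList ds
  · exact List.Pairwise.filter _ (by decide)

-- ===== VERDICT (by name: the statement is the Claim_ definition above) =====
theorem parse_matric_spec : Claim_equal_parse_matric := by
  intro m _ hpre
  unfold Spec_parse_matric parse_matric parse_matric_alt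
  rw [fold_eq_digits, foldl_digStep]
  rw [show ((m.toList.filter PySem.Chars.isdigit).map (fun c => (c.toNat : Int) - 48))
      = pvDigits m.toList from rfl]
  have hpre' : 2 ≤ (pvDigits m.toList).length := by simpa [pvDigits] using hpre
  have hb := pvDigits_bounds m.toList
  generalize hg : pvDigits m.toList = ds at *
  clear hg hpre
  -- split ds = es ++ [a, b]
  obtain ⟨es', b, hsplit⟩ := List.eq_nil_or_concat ds |>.resolve_left (by
    intro h; rw [h] at hpre'; simp at hpre')
  obtain ⟨es, a, hsplit2⟩ := List.eq_nil_or_concat es' |>.resolve_left (by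
    intro h; rw [h] at hsplit; rw [hsplit] at hpre'; simp at hpre')
  have hds2 : ds = es ++ [a, b] := by rw [hsplit, hsplit2]; simp
  have hlen : ds.length = es.length + 2 := by rw [hds2]; simp
  have hnotlt : ¬ ds.length < 2 := by omega
  have hgl : PySem.List.pyGetD ds (-1) 0 = b := by
    simp only [PySem.List.pyGetD, PySem.List.pyGet?, PySem.List.pyIdx?, hlen]
    norm_num
    rw [hds2]
    simp
  have hg2 : PySem.List.pyGetD ds (-2) 0 = a := by
    simp only [PySem.List.pyGetD, PySem.List.pyGet?, PySem.List.pyIdx?, hlen]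
    norm_num
    rw [hds2]
    simp
  rw [if_neg hnotlt, hds2, pvLastTwo_concat2, ← hds2, hgl, hg2]
  dsimp only
  rw [sorted_set_eq ds hb,
      show PySem.List.pyRange 0 10 = ([0,1,2,3,4,5,6,7,8,9] : List Int) from by decide]
  simp only [Prod.mk.injEq]
  refine ⟨trivial, trivial, ?_⟩
  congr 1
  apply List.filter_congr
  intro x hx
  have hx' := (mem_range10 x).mp hx
  have hxnat : x = ((x.toNat : Nat) : Int) := by omega
  rw [hxnat, PySem.List.pyGetD, PySem.List.pyGet?_natCast,
    ← List.getD_eq_getElem?_getD,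
    seen_foldl ds (List.replicate 10 false) hb (by simp) x.toNat (by omega)]
  rw [List.getD_eq_getElem?_getD, List.getElem?_replicate, if_pos (by omega)]
  simp
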